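-- pv_equiv track=rewrite | github.com/anniehastur450/challenge2022 | EXE1_Python/Q4.py | longest_seq
-- ===== SOURCE A (Python) =====
-- def longest_seq(a, b):
--     # pure algorithm implementation
--     maxCount = 0
--     for i in range(len(a)):
--         j = 0
--         while i + j < len(a) and a[i + j] == b[j % len(b)]:
--             j += 1
--         maxCount = max(maxCount, j // len(b))  # int divison
--     return maxCount
-- ===== SOURCE B (Python) =====
-- def longest_seq(a, b):
--     # right-to-left DP: cnt[i] = number of consecutive full copies of b starting at i
--     n, m = len(a), len(b)
--     cnt = [0] * (n + 1)
--     best = 0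
--     for i in range(n - m, -1, -1):
--         if a[i:i + m] == b:
--             cnt[i] = cnt[i + m] + 1
--             if cnt[i] > best:
--                 best = cnt[i]
--     return best
-- ===== Notes on version B (the rewrite author's own statement) =====
-- stated objective: faster
-- what changed: Instead of re-matching b's infinite repetition from every start index (restarting the scan each time), B makes one right-to-left pass computing a DP table cnt[i] = full copies of b starting at i via cnt[i] = cnt[i+len(b)]+1 when a[i:i+len(b)] == b, tracking the maximum.
-- outside the precondition, e.g. on longest_seq([], []): A returns 0, B returns 1
import Mathlib
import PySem

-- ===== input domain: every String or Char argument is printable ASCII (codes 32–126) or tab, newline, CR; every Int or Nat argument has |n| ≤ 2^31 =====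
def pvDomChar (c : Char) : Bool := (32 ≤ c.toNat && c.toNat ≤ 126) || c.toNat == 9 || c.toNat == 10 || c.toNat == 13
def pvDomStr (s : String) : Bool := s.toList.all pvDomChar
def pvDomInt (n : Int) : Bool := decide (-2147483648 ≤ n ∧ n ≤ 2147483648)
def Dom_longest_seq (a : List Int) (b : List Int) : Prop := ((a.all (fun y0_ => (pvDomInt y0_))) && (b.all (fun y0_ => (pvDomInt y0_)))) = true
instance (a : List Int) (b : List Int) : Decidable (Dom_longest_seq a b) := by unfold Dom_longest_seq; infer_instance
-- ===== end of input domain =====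

-- B replaces A's per-start rescan of b's repetition by one right-to-left DP pass over a (faster).

-- ===== PORT A =====
-- inner while loop of A: j increases while a[i+j] == b[j % len(b)]; indices are
-- guarded in range, so List.getD is exact here (j % len(b) < len(b) under Pre_).
def loopA (a b : List Int) (i j : Nat) : Nat :=
  if _h : i + j < a.length then
    if a.getD (i + j) 0 = b.getD (j % b.length) 0 then loopA a b i (j + 1) else j
  else j
termination_by a.length - (i + j)

-- maxCount stays a Nat (Python's ints here are counts ≥ 0), cast at the end.
def longest_seq (a : List Int) (b : List Int) : Int :=
  ((List.range a.length).foldl (fun mc i => max mc (loopA a b i 0 / b.length)) 0 : Nat)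

-- ===== PORT B =====
-- the loop 'for i in range(n-m, -1, -1)': k+1 iterations remaining, current i = k.
-- cnt[i+m] is in range (i+m ≤ n, len(cnt) = n+1), so List.getD is exact.
def loopB (a b : List Int) (m : Nat) : Nat → List Int → Int → List Int × Int
  | 0, cnt, best => (cnt, best)
  | k + 1, cnt, best =>
      if PySem.List.slice a (some (k : Int)) (some ((k : Int) + (m : Int))) = b then
        let v := cnt.getD (k + m) 0 + 1
        loopB a b m k (cnt.set k v) (if v > best then v else best)
      else
        loopB a b m k cnt best

def longest_seq_alt (a : List Int) (b : List Int) : Int :=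
  let n := a.length
  let m := b.length
  (loopB a b m (n + 1 - m) (List.replicate (n + 1) (0 : Int)) 0).2

-- ===== PRECONDITION & SPEC =====
-- Pre_ excludes empty b: there A raises ZeroDivisionError (j % len(b)) whenever a is
-- nonempty, and on a = [], b = [] A's 0 (empty loop) vs B's 1 (one empty copy matches)
-- is a defensible unspecified corner ('how many copies of nothing match').
def Pre_longest_seq (a : List Int) (b : List Int) : Prop := b ≠ []
instance (a : List Int) (b : List Int) : Decidable (Pre_longest_seq a b) := by unfold Pre_longest_seq; infer_instance
def pvWitness_longest_seq : List Int × List Int := ([1, 2, 1, 2, 1], [1, 2])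

def Spec_longest_seq (a : List Int) (b : List Int) (out : Int) : Prop := out = longest_seq_alt a b
instance (a : List Int) (b : List Int) (out : Int) : Decidable (Spec_longest_seq a b out) := by unfold Spec_longest_seq; infer_instance

-- ===== CLAIM (what is proved, stated in full; the proofs are below) =====
def Claim_equal_longest_seq : Prop := ∀ (a : List Int) (b : List Int), Dom_longest_seq a b → Pre_longest_seq a b → Spec_longest_seq a b (longest_seq a b)

-- ===== LEMMAS AND PROOFS =====

-- "a full copy of b matches at i, then at i+m, …": number of consecutive full copies.
def Cfun (a b : List Int) (i : Nat) : Nat :=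
  if h : 0 < b.length ∧ i < a.length ∧ (a.drop i).take b.length = b then
    1 + Cfun a b (i + b.length)
  else 0
termination_by a.length - i
decreasing_by omega

-- running maximum of Cfun over starts 0..k-1 (mirrors A's outer fold)
def Mx (a b : List Int) (k : Nat) : Nat :=
  (List.range k).foldl (fun x i => max x (Cfun a b i)) 0

-- the inner-loop continuation condition, with j reduced mod m spelled out at offset t < m
def CondAll (a b : List Int) (i : Nat) : Prop :=
  ∀ t, t < b.length → i + t < a.length ∧ a.getD (i + t) 0 = b.getD t 0

theorem loopA_stop (a b : List Int) (i j : Nat)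
    (h : ¬ (i + j < a.length ∧ a.getD (i + j) 0 = b.getD (j % b.length) 0)) :
    loopA a b i j = j := by
  rw [loopA]
  split_ifs with h1 h2
  · exact absurd ⟨h1, h2⟩ h
  · rfl
  · rfl

theorem loopA_cont (a b : List Int) (i j : Nat)
    (h1 : i + j < a.length) (h2 : a.getD (i + j) 0 = b.getD (j % b.length) 0) :
    loopA a b i j = loopA a b i (j + 1) := by
  rw [loopA]
  rw [dif_pos h1, if_pos h2]

theorem loopA_shift_aux (a b : List Int) (i : Nat) :
    ∀ (fuel j : Nat), a.length - (i + b.length + j) ≤ fuel →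
      loopA a b i (j + b.length) = b.length + loopA a b (i + b.length) j := by
  intro fuel
  induction fuel with
  | zero =>
      intro j hj
      have hstop : ¬ (i + (j + b.length) < a.length) := by omega
      have hstop' : ¬ ((i + b.length) + j < a.length) := by omega
      rw [loopA_stop a b i (j + b.length) (by tauto),
          loopA_stop a b (i + b.length) j (by tauto)]
      omega
  | succ N ih =>
      intro j hj
      by_cases h1 : i + (j + b.length) < a.length
      · by_cases h2 : a.getD (i + (j + b.length)) 0 = b.getD ((j + b.length) % b.length) 0
        · have e1 : loopA a b i (j + b.length) = loopA a b i (j + b.length + 1) :=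
            loopA_cont a b i (j + b.length) h1 h2
          have h1' : (i + b.length) + j < a.length := by omega
          have h2' : a.getD ((i + b.length) + j) 0 = b.getD (j % b.length) 0 := by
            have : (i + b.length) + j = i + (j + b.length) := by omega
            rw [this]
            rwa [Nat.add_mod_right] at h2
          have e2 : loopA a b (i + b.length) j = loopA a b (i + b.length) (j + 1) :=
            loopA_cont a b (i + b.length) j h1' h2'
          have : j + b.length + 1 = (j + 1) + b.length := by omega
          rw [e1, this, ih (j + 1) (by omega), e2]
        · rw [loopA_stop a b i (j + b.length) (by tauto)]
          have h2' : ¬ (a.getD ((i + b.length) + j) 0 = b.getD (j % b.length) 0) := by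
            have e : (i + b.length) + j = i + (j + b.length) := by omega
            rw [e]
            rwa [Nat.add_mod_right] at h2
          rw [loopA_stop a b (i + b.length) j (by tauto)]
          omega
      · rw [loopA_stop a b i (j + b.length) (by tauto),
            loopA_stop a b (i + b.length) j (by omega ; )]
        omega

theorem loopA_shift (a b : List Int) (i j : Nat) :
    loopA a b i (j + b.length) = b.length + loopA a b (i + b.length) j :=
  loopA_shift_aux a b i _ j le_rfl

-- if all of the first m offsets match, the loop runs at least through them
theorem loopA_walk (a b : List Int) (i : Nat) (h : CondAll a b i) :
    ∀ (k j : Nat), j + k = b.length → loopA a b i j = loopA a b i b.length := by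
  intro k
  induction k with
  | zero => intro j hj; rw [show j = b.length by omega]
  | succ K ih =>
      intro j hj
      have hjm : j < b.length := by omega
      obtain ⟨hlt, heq⟩ := h j hjm
      have hmod : j % b.length = j := Nat.mod_eq_of_lt hjm
      rw [loopA_cont a b i j hlt (by rwa [hmod])]
      exact ih (j + 1) (by omega)

theorem loopA_of_condAll (a b : List Int) (i : Nat) (h : CondAll a b i) :
    loopA a b i 0 = b.length + loopA a b (i + b.length) 0 := by
  have h1 := loopA_walk a b i h b.length 0 (by omega)
  have h2 := loopA_shift a b i 0
  rw [h1]
  simpa using h2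

-- if the loop reaches m, every offset below m matched
theorem loopA_run_eq (a b : List Int) (i : Nat) (hge : b.length ≤ loopA a b i 0) :
    ∀ t, t ≤ b.length →
      ((∀ s, s < t → i + s < a.length ∧ a.getD (i + s) 0 = b.getD s 0) ∧
        loopA a b i t = loopA a b i 0) := by
  intro t
  induction t with
  | zero => intro _; exact ⟨by omega, rfl⟩
  | succ T ih =>
      intro ht
      obtain ⟨hall, heq⟩ := ih (by omega)
      have hTm : T < b.length := by omega
      have hmod : T % b.length = T := Nat.mod_eq_of_lt hTm
      have hcond : i + T < a.length ∧ a.getD (i + T) 0 = b.getD (T % b.length) 0 := by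
        by_contra hc
        have := loopA_stop a b i T hc
        omega
      refine ⟨?_, ?_⟩
      · intro s hs
        rcases Nat.lt_or_ge s T with h' | h'
        · exact hall s h'
        · have : s = T := by omega
          subst this
          rw [hmod] at hcond
          exact hcond
      · rw [← heq, ← loopA_cont a b i T hcond.1 hcond.2]

theorem condAll_of_ge (a b : List Int) (i : Nat) (hge : b.length ≤ loopA a b i 0) :
    CondAll a b i := by
  intro t ht
  exact (loopA_run_eq a b i hge b.length le_rfl).1 t ht

-- slice match ↔ elementwise condition
theorem match_iff_condAll (a b : List Int) (i : Nat) (hm : 0 < b.length) :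
    (a.drop i).take b.length = b ↔ CondAll a b i := by
  constructor
  · intro h t ht
    have hlen : ((a.drop i).take b.length).length = b.length := by rw [h]
    have hlen' : min b.length (a.length - i) = b.length := by
      simpa [List.length_take, List.length_drop] using hlen
    have hle : b.length ≤ a.length - i := by omega
    have hit : i + t < a.length := by omega
    refine ⟨hit, ?_⟩
    have ht' : t < ((a.drop i).take b.length).length := by
      simp [List.length_take, List.length_drop]; omega
    have : ((a.drop i).take b.length)[t]'ht' = b[t]'(by omega) := by
      simp [h]
    rw [List.getElem_take, List.getElem_drop] at this
    have e1 : a.getD (i + t) 0 = a[i + t]'hit := List.getD_eq_getElem a 0 hit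
    have e2 : b.getD t 0 = b[t]'(by omega) := List.getD_eq_getElem b 0 (by omega)
    rw [e1, e2, ← this]
  · intro h
    have hle : b.length ≤ a.length - i := by
      have := (h (b.length - 1) (by omega)).1
      omega
    apply List.ext_getElem
    · simp [List.length_take, List.length_drop]; omega
    · intro t h1 h2
      have ht : t < b.length := h2
      obtain ⟨hit, heq⟩ := h t ht
      rw [List.getElem_take, List.getElem_drop]
      have e1 : a.getD (i + t) 0 = a[i + t]'hit := List.getD_eq_getElem a 0 hit
      have e2 : b.getD t 0 = b[t]'ht := List.getD_eq_getElem b 0 ht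
      rw [e1, e2] at heq
      exact heq

theorem loopA_div (a b : List Int) (hm : 0 < b.length) :
    ∀ fuel i, a.length - i ≤ fuel → loopA a b i 0 / b.length = Cfun a b i := by
  intro fuel
  induction fuel with
  | zero =>
      intro i hi
      have hstop : ¬ (i + 0 < a.length) := by omega
      rw [loopA_stop a b i 0 (by tauto)]
      rw [Cfun]
      have : ¬ (0 < b.length ∧ i < a.length ∧ (a.drop i).take b.length = b) := by
        intro ⟨_, h2, _⟩; omega
      simp [this, Nat.div_eq_of_lt hm]
  | succ N ih =>
      intro i hi
      by_cases hc : CondAll a b i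
      · have hmatch : (a.drop i).take b.length = b := (match_iff_condAll a b i hm).2 hc
        have hilt : i < a.length := by
          have := (hc 0 hm).1; omega
        have e := loopA_of_condAll a b i hc
        rw [e, Nat.add_div_left _ hm]
        rw [Cfun]
        simp only [hm, hilt, hmatch, and_self, dite_true]
        rw [ih (i + b.length) (by omega)]
        omega
      · have hlt : loopA a b i 0 < b.length := by
          by_contra h
          exact hc (condAll_of_ge a b i (by omega))
        rw [Nat.div_eq_of_lt hlt, Cfun]
        have : ¬ (0 < b.length ∧ i < a.length ∧ (a.drop i).take b.length = b) := by
          intro ⟨_, _, h3⟩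
          exact hc ((match_iff_condAll a b i hm).1 h3)
        simp [this]

theorem Cfun_zero_of_large (a b : List Int) (i : Nat) (h : a.length < i + b.length) :
    Cfun a b i = 0 := by
  rw [Cfun]
  have : ¬ (0 < b.length ∧ i < a.length ∧ (a.drop i).take b.length = b) := by
    rintro ⟨h1, h2, h3⟩
    have : ((a.drop i).take b.length).length = b.length := by rw [h3]
    simp [List.length_take, List.length_drop] at this
    omega
  simp [this]

theorem Mx_succ (a b : List Int) (k : Nat) :
    Mx a b (k + 1) = max (Mx a b k) (Cfun a b k) := by
  simp [Mx, List.range_succ]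

theorem loopB_spec (a b : List Int) (hm : 0 < b.length) :
    ∀ (k : Nat) (cnt : List Int) (best : Int),
      cnt.length = a.length + 1 → 0 ≤ best →
      (∀ j, j < cnt.length → cnt.getD j 0 = if k ≤ j then (Cfun a b j : Int) else 0) →
      (loopB a b b.length k cnt best).2 = max best ((Mx a b k : Nat) : Int) := by
  intro k
  induction k with
  | zero =>
      intro cnt best _ hb _
      simp [loopB, Mx]
      omega
  | succ K ih =>
      intro cnt best hlen hb hinv
      rw [loopB]
      have hslice : PySem.List.slice a (some (K : Int)) (some ((K : Int) + (b.length : Int)))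
          = (a.drop K).take b.length := PySem.List.slice_natCast_add a K b.length
      by_cases hmatch : (a.drop K).take b.length = b
      · have hKm' : K + b.length ≤ a.length := by
          have hlen2 : ((a.drop K).take b.length).length = b.length := by rw [hmatch]
          simp only [List.length_take, List.length_drop] at hlen2
          omega
        have hKlt : K < a.length := by omega
        have hKm : K + b.length < cnt.length := by omega
        have hvc : cnt.getD (K + b.length) 0 = (Cfun a b (K + b.length) : Int) := by
          rw [hinv (K + b.length) hKm]
          simp [show K + 1 ≤ K + b.length by omega]
        have hCK : Cfun a b K = 1 + Cfun a b (K + b.length) := by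
          rw [Cfun]; simp [hm, hKlt, hmatch]
        set v : Int := cnt.getD (K + b.length) 0 + 1 with hvdef
        have hv : v = ((Cfun a b K : Nat) : Int) := by
          rw [hvdef, hvc, hCK]; push_cast; ring
        have hlen' : (cnt.set K v).length = a.length + 1 := by simp [hlen]
        have hbest' : (0 : Int) ≤ if v > best then v else best := by
          split_ifs <;> omega
        have hinv' : ∀ j, j < (cnt.set K v).length →
            (cnt.set K v).getD j 0 = if K ≤ j then (Cfun a b j : Int) else 0 := by
          intro j hj
          rw [List.length_set] at hj
          by_cases hjK : j = K
          · subst hjK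
            have : (cnt.set j v).getD j 0 = v := by
              simp [List.getD_eq_getElem?_getD, show j < cnt.length by omega]
            rw [this, hv]
            simp
          · have : (cnt.set K v).getD j 0 = cnt.getD j 0 := by
              simp [List.getD_eq_getElem?_getD, Ne.symm hjK]
            rw [this, hinv j hj]
            by_cases hle : K ≤ j
            · simp [hle, show K + 1 ≤ j by omega]
            · simp [hle, show ¬ (K + 1 ≤ j) by omega]
        simp only [hslice, hmatch, if_true]
        rw [ih (cnt.set K v) (if v > best then v else best) hlen' hbest' hinv']
        have hbmax : (if v > best then v else best) = max best ((Cfun a b K : Nat) : Int) := by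
          rw [hv]; split_ifs with h <;> omega
        rw [hbmax, Mx_succ]
        push_cast [Nat.cast_max]
        rw [max_assoc, max_comm ((Cfun a b K : Nat) : Int)]
      · have hCK : Cfun a b K = 0 := by
          rw [Cfun]; simp [hmatch]
        have hinv' : ∀ j, j < cnt.length →
            cnt.getD j 0 = if K ≤ j then (Cfun a b j : Int) else 0 := by
          intro j hj
          rw [hinv j hj]
          by_cases hjK : j = K
          · rw [hjK]
            simp [show ¬ (K + 1 ≤ K) by omega, hCK]
          · by_cases hle : K ≤ j
            · simp [hle, show K + 1 ≤ j by omega]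
            · simp [hle, show ¬ (K + 1 ≤ j) by omega]
        simp only [hslice, hmatch, if_false]
        rw [ih cnt best hlen hb hinv']
        rw [Mx_succ, hCK]
        simp

theorem Mx_flat (a b : List Int) (hm : 0 < b.length) :
    ∀ d, a.length + 1 - b.length + d ≤ a.length →
      Mx a b (a.length + 1 - b.length + d) = Mx a b (a.length + 1 - b.length) := by
  intro d
  induction d with
  | zero => intro _; rfl
  | succ D ih =>
      intro hd
      have e : a.length + 1 - b.length + (D + 1) = (a.length + 1 - b.length + D) + 1 := by omega
      rw [e, Mx_succ, Cfun_zero_of_large a b _ (by omega), ih (by omega)]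
      simp

theorem A_eq_Mx (a b : List Int) (hm : 0 < b.length) :
    longest_seq a b = ((Mx a b a.length : Nat) : Int) := by
  unfold longest_seq Mx
  congr 1
  apply List.foldl_ext
  intro acc i hi
  rw [loopA_div a b hm (a.length - i) i le_rfl]

-- ===== VERDICT (by name: the statement is the Claim_ definition above) =====
theorem longest_seq_spec : Claim_equal_longest_seq := by
  intro a b _ hpre
  unfold Spec_longest_seq
  have hm : 0 < b.length := List.length_pos_iff.2 hpre
  rw [A_eq_Mx a b hm]
  unfold longest_seq_alt
  rw [loopB_spec a b hm (a.length + 1 - b.length) _ 0 (by simp) le_rfl ?_]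
  · have : Mx a b a.length = Mx a b (a.length + 1 - b.length) := by
      have := Mx_flat a b hm (a.length - (a.length + 1 - b.length)) (by omega)
      rw [show a.length + 1 - b.length + (a.length - (a.length + 1 - b.length)) = a.length by omega] at this
      exact this
    rw [this]
    simp
  · intro j hj
    simp only [List.length_replicate] at hj
    rw [List.getD_eq_getElem _ 0 (by simpa using hj)]
    simp only [List.getElem_replicate]
    by_cases hle : a.length + 1 - b.length ≤ j
    · rw [Cfun_zero_of_large a b j (by omega)]
      simp
    · simp [hle]
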